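-- pv_equiv track=rewrite | github.com/ayushpatel497/Daily_POTD | Day160_2025/Q160_Leetcode.py | countNumbersWithPrefix
-- ===== SOURCE A (Python) =====
-- def countNumbersWithPrefix(prefix, n):
--     curr, next = prefix, prefix + 1
--     count = 0
--     while curr <= n:
--         count += min(n + 1, next) - curr
--         curr *= 10
--         next *= 10
--     return count
-- ===== SOURCE B (Python) =====
-- def countNumbersWithPrefix(prefix, n):
--     if n < prefix:
--         return 0
--     # number of digits (minus 1) of the quotient = top level K with prefix*10**K <= n
--     k = 0
--     q = n // prefix
--     while q >= 10:
--         q //= 10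
--         k += 1
--     p = 10 ** k
--     # levels 0..k-1 are full (10**j numbers each, summing to the repunit (p-1)//9);
--     # the top level contributes the clamped interval [prefix*p, min(n, (prefix+1)*p - 1)]
--     return (p - 1) // 9 + min(n + 1 - prefix * p, p)
-- ===== Notes on version B (the rewrite author's own statement) =====
-- stated objective: alternative
-- what changed: Replaces the level-by-level accumulation over curr/next with a direct computation: find the top level K as the digit count of n//prefix, then return the closed form repunit (10^K-1)/9 plus the clamped size of the top level.
import Mathlib
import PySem

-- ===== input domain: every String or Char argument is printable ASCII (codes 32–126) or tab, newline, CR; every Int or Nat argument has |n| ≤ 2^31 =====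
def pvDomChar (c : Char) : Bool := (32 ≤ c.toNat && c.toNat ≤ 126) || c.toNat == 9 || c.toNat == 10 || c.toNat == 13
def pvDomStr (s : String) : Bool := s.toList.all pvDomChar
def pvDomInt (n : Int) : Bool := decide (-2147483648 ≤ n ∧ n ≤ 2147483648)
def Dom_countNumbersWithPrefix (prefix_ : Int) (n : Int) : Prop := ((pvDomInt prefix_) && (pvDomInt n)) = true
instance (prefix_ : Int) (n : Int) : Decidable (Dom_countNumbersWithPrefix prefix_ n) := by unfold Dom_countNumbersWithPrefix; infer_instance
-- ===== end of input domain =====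

-- B replaces A's level-by-level accumulation by a digit-count loop on n//prefix plus a
-- closed-form repunit expression; same cost class, different decomposition.

-- ===== PORT A =====
-- the while loop of A, with fuel; 40 iterations always suffice on Dom (inside Pre_,
-- curr starts ≥ 1 and is multiplied by 10 each round while curr ≤ n ≤ 2^31 < 10^40)
def loopA (n : Int) : Nat → Int → Int → Int → Int
  | 0, _, _, count => count
  | fuel+1, curr, next, count =>
    if curr ≤ n then loopA n fuel (curr*10) (next*10) (count + (min (n+1) next - curr))
    else count

def countNumbersWithPrefix (prefix_ : Int) (n : Int) : Int :=
  loopA n 40 prefix_ (prefix_+1) 0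

-- ===== PORT B =====
-- B's while loop: divide q by 10 until q < 10, counting steps (terminates for every Int q)
def loopB (q k : Int) : Int :=
  if h : 10 ≤ q then loopB (PySem.Int.floordiv q 10) (k+1) else k
termination_by q.toNat
decreasing_by
  rw [PySem.Int.floordiv_eq_ediv_of_pos (by norm_num)]
  omega

def countNumbersWithPrefix_alt (prefix_ : Int) (n : Int) : Int :=
  if n < prefix_ then 0
  else
    let k := loopB (PySem.Int.floordiv n prefix_) 0
    let p := (10:Int) ^ k.toNat   -- Python 10 ** k; k ≥ 0 always holds here
    PySem.Int.floordiv (p - 1) 9 + min (n + 1 - prefix_ * p) p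

-- ===== PRECONDITION & SPEC =====
-- Pre_ excludes exactly the inputs where A's while loop never terminates
-- (prefix ≤ 0 with prefix ≤ n): A returns on an input iff prefix ≥ 1 or n < prefix.
def Pre_countNumbersWithPrefix (prefix_ : Int) (n : Int) : Prop :=
  1 ≤ prefix_ ∨ n < prefix_
instance (prefix_ : Int) (n : Int) : Decidable (Pre_countNumbersWithPrefix prefix_ n) := by
  unfold Pre_countNumbersWithPrefix; infer_instance

def pvWitness_countNumbersWithPrefix : Int × Int := (13, 2000)

def Spec_countNumbersWithPrefix (prefix_ : Int) (n : Int) (out : Int) : Prop := out = countNumbersWithPrefix_alt prefix_ n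
instance (prefix_ : Int) (n : Int) (out : Int) : Decidable (Spec_countNumbersWithPrefix prefix_ n out) := by unfold Spec_countNumbersWithPrefix; infer_instance

-- ===== CLAIM (what is proved, stated in full; the proofs are below) =====
def Claim_equal_countNumbersWithPrefix : Prop := ∀ (prefix_ : Int) (n : Int), Dom_countNumbersWithPrefix prefix_ n → Pre_countNumbersWithPrefix prefix_ n → Spec_countNumbersWithPrefix prefix_ n (countNumbersWithPrefix prefix_ n)

-- ===== LEMMAS AND PROOFS =====

-- repunit: R K = (10^K - 1)/9 = number of full levels' total below level K ... 111…1
def repu : Nat → Int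
  | 0 => 0
  | K+1 => 10 * repu K + 1

theorem nine_repu (K : Nat) : 9 * repu K = 10 ^ K - 1 := by
  induction K with
  | zero => simp [repu]
  | succ K ih => simp only [repu, pow_succ]; linarith

theorem loopA_gt (n : Int) (fuel : Nat) (curr next count : Int) (h : n < curr) :
    loopA n fuel curr next count = count := by
  cases fuel with
  | zero => rfl
  | succ f => simp only [loopA]; rw [if_neg (by omega)]

theorem loopA_spec (n : Int) (K : Nat) : ∀ (fuel : Nat) (p e count : Int),
    K < fuel → 1 ≤ e → e ≤ p → p * 10 ^ K ≤ n → n < p * 10 ^ (K+1) →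
    loopA n fuel p (p + e) count
      = count + e * repu K + min (n+1) ((p+e) * 10 ^ K) - p * 10 ^ K := by
  induction K with
  | zero =>
    intro fuel p e count hf he hep hlo hhi
    obtain ⟨f, rfl⟩ : ∃ f, fuel = f + 1 := ⟨fuel - 1, by omega⟩
    have hlo0 : p ≤ n := by simpa using hlo
    have hhi0 : n < p * 10 := by
      have h := hhi
      have e : p * 10 ^ (0+1) = p * 10 := by ring
      rw [e] at h
      exact h
    simp only [loopA]
    rw [if_pos hlo0, loopA_gt _ _ _ _ _ hhi0]
    simp [repu]
    omega
  | succ K ih =>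
    intro fuel p e count hf he hep hlo hhi
    obtain ⟨f, rfl⟩ : ∃ f, fuel = f + 1 := ⟨fuel - 1, by omega⟩
    have hp : 1 ≤ p := le_trans he hep
    have hpow : (1:Int) ≤ 10 ^ K := one_le_pow₀ (by norm_num)
    have h10 : p * 10 ≤ p * 10 ^ (K+1) := by
      have : (10:Int) ≤ 10 ^ (K+1) := by
        calc (10:Int) = 10 * 1 := by ring
        _ ≤ 10 ^ K * 10 := by nlinarith
        _ = 10 ^ (K+1) := by ring
      nlinarith
    have hlo' : p * 10 ≤ n := by
      have e : p * 10 * 10 ^ K = p * 10 ^ (K+1) := by ring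
      nlinarith [hlo]
    have hcurr : p ≤ n := by nlinarith [hlo]
    simp only [loopA]
    rw [if_pos hcurr]
    have hmin : min (n+1) (p+e) = p + e := by
      have : p + e ≤ p * 10 := by nlinarith
      omega
    rw [hmin]
    have harg : (p + e) * 10 = p * 10 + e * 10 := by ring
    rw [harg]
    have := ih f (p*10) (e*10) (count + (p + e - p)) (by omega) (by omega) (by omega)
      (by calc p * 10 * 10 ^ K = p * 10 ^ (K+1) := by ring
          _ ≤ n := hlo)
      (by calc n < p * 10 ^ (K+1+1) := hhi
          _ = p * 10 * 10 ^ (K+1) := by ring)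
    rw [this]
    have hm2 : (p * 10 + e * 10) * 10 ^ K = (p + e) * 10 ^ (K+1) := by ring
    rw [hm2]
    have hm3 : p * 10 * 10 ^ K = p * 10 ^ (K+1) := by ring
    rw [hm3]
    simp only [repu]; ring

theorem loopB_spec (K : Nat) : ∀ (q k : Int),
    (10:Int) ^ K ≤ q → q < 10 ^ (K+1) → loopB q k = k + K := by
  induction K with
  | zero =>
    intro q k hlo hhi
    rw [loopB, dif_neg (by simp at hlo hhi; omega)]
    simp
  | succ K ih =>
    intro q k hlo hhi
    have hpow : (1:Int) ≤ 10 ^ K := one_le_pow₀ (by norm_num)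
    have h10 : (10:Int) ≤ q := by
      have : (10:Int) ≤ 10 ^ (K+1) := by
        calc (10:Int) = 1 * 10 := by ring
        _ ≤ 10 ^ K * 10 := by nlinarith
        _ = 10 ^ (K+1) := by ring
      omega
    rw [loopB, dif_pos h10]
    rw [PySem.Int.floordiv_eq_ediv_of_pos (by norm_num)]
    have hlo' : (10:Int) ^ K ≤ q / 10 := by
      rw [Int.le_ediv_iff_mul_le (by norm_num)]
      calc (10:Int) ^ K * 10 = 10 ^ (K+1) := by ring
      _ ≤ q := hlo
    have hhi' : q / 10 < 10 ^ (K+1) := by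
      rw [Int.ediv_lt_iff_lt_mul (by norm_num)]
      calc q < 10 ^ (K+1+1) := hhi
      _ = 10 ^ (K+1) * 10 := by ring
    rw [ih (q/10) (k+1) hlo' hhi']
    push_cast; ring

theorem exists_K (n : Int) : ∀ (B : Nat) (p : Int), 1 ≤ p → p ≤ n → n < p * 10 ^ B →
    ∃ K, K < B ∧ p * 10 ^ K ≤ n ∧ n < p * 10 ^ (K+1) := by
  intro B
  induction B with
  | zero => intro p h1 h2 h3; simp at h3; omega
  | succ B ih =>
    intro p h1 h2 h3
    by_cases h : n < p * 10 ^ B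
    · obtain ⟨K, hK, hlo, hhi⟩ := ih p h1 h2 h
      exact ⟨K, by omega, hlo, hhi⟩
    · exact ⟨B, by omega, by omega, h3⟩

-- ===== VERDICT (by name: the statement is the Claim_ definition above) =====
theorem countNumbersWithPrefix_spec : Claim_equal_countNumbersWithPrefix := by
  intro prefix_ n hdom hpre
  unfold Spec_countNumbersWithPrefix countNumbersWithPrefix countNumbersWithPrefix_alt
  by_cases h : n < prefix_
  · rw [if_pos h, loopA_gt _ _ _ _ _ h]
  · rw [if_neg h]
    push Not at h
    have hp1 : 1 ≤ prefix_ := by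
      rcases hpre with h1 | h2
      · exact h1
      · omega
    have hn : n ≤ 2147483648 := by
      simp [Dom_countNumbersWithPrefix, pvDomInt] at hdom; omega
    have hbig : n < prefix_ * 10 ^ 40 := by
      have : (2147483648:Int) < 10 ^ 40 := by norm_num
      nlinarith [one_le_pow₀ (show (1:Int) ≤ 10 by norm_num) (n := 40)]
    obtain ⟨K, hK, hlo, hhi⟩ := exists_K n 40 prefix_ hp1 h hbig
    -- A side
    rw [loopA_spec n K 40 prefix_ 1 0 hK (le_refl 1) hp1 hlo hhi]
    -- B side: the quotient has K+1 digits
    have hq := PySem.Int.floordiv_eq_ediv_of_pos (a := n) (show (0:Int) < prefix_ by omega)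
    have hqlo : (10:Int) ^ K ≤ PySem.Int.floordiv n prefix_ := by
      rw [hq, Int.le_ediv_iff_mul_le (by omega)]
      calc (10:Int) ^ K * prefix_ = prefix_ * 10 ^ K := by ring
      _ ≤ n := hlo
    have hqhi : PySem.Int.floordiv n prefix_ < 10 ^ (K+1) := by
      rw [hq, Int.ediv_lt_iff_lt_mul (by omega)]
      calc n < prefix_ * 10 ^ (K+1) := hhi
      _ = 10 ^ (K+1) * prefix_ := by ring
    rw [loopB_spec K _ 0 hqlo hqhi]
    simp only [zero_add, Int.toNat_natCast]
    have hrep : (10:Int) ^ K - 1 = 9 * repu K := by rw [nine_repu]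
    rw [hrep, PySem.Int.floordiv_eq_ediv_of_pos (show (0:Int) < 9 by norm_num),
      Int.mul_ediv_cancel_left _ (by norm_num)]
    have hexp : (prefix_ + 1) * 10 ^ K = prefix_ * 10 ^ K + 10 ^ K := by ring
    rw [hexp]
    omega
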